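-- pv_equiv track=rewrite | github.com/Dimitrije-Jimmy/AdventOfCode2024 | day7/main1.3.py | generate_and_evaluate
-- ===== SOURCE A (Python) =====
-- from itertools import product
--
-- def generate_and_evaluate(numbers):
--     """
--     Generates all possible expressions by inserting '+' or '*' between numbers
--     and evaluates them from left to right (ignoring operator precedence).
--
--     Args:
--         numbers (list of int): The list of numbers.
--
--     Returns:
--         list of int: The list of evaluated results.
--     """
--     if not numbers:
--         return []
--
--     if len(numbers) == 1:
--         return [numbers[0]]
--
--     ops = ['+', '*']
--     n = len(numbers) - 1
--     results = []
--
--     # Generate all possible combinations of operations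
--     for op_comb in product(ops, repeat=n):
--         # Evaluate the expression from left to right
--         result = numbers[0]
--         for op, num in zip(op_comb, numbers[1:]):
--             if op == '+':
--                 result += num
--             elif op == '*':
--                 result *= num
--         results.append(result)
--
--     return results
-- ===== SOURCE B (Python) =====
-- def generate_and_evaluate(numbers):
--     """Incremental doubling: extend the list of partial left-to-right results
--     by +num and *num for each new number (O(2^n) vs A's O(n*2^n))."""
--     if not numbers:
--         return []
--     acc = [numbers[0]]
--     for num in numbers[1:]:
--         acc = [v for r in acc for v in (r + num, r * num)]
--     return acc
-- ===== Notes on version B (the rewrite author's own statement) =====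
-- stated objective: faster
-- what changed: Replaces enumerating all 2^n operator tuples and re-evaluating each expression from scratch with an incremental pass that doubles the partial-result list by +num/*num per new number, preserving product order; intended as faster (O(2^n) vs O(n*2^n)), measured 4.9x at n=16 (both exceed the timeout at n=64, where the output itself has 2^63 entries).
import Mathlib
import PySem

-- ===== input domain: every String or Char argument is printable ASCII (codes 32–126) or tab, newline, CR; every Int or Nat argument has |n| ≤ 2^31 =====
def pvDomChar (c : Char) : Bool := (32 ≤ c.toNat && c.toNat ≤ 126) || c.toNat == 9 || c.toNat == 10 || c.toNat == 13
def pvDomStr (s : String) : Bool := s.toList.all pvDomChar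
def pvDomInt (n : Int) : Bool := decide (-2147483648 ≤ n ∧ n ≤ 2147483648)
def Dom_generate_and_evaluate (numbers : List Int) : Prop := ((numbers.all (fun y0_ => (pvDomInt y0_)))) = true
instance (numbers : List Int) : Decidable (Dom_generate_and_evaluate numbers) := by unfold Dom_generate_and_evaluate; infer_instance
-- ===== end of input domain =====

-- B replaces A's per-tuple re-evaluation of all 2^n operator combinations with an incremental
-- doubling of the partial-result list (+num / *num per new number), same values in the same order; intended as faster, measured 4.9x at n=16.


-- ===== PORT A =====
-- product(ops, repeat=n): lists of length n, first position varying slowest (itertools order)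
def prodRep (ops : List String) : Nat → List (List String)
  | 0 => [[]]
  | n+1 => ops.flatMap (fun o => (prodRep ops n).map (fun rest => o :: rest))

def generate_and_evaluate (numbers : List Int) : List Int :=
  match numbers with
  | [] => []
  | [x] => [x]
  | x :: rest =>
    let n := rest.length
    (prodRep ["+", "*"] n).map (fun op_comb =>
      (List.zip op_comb rest).foldl (fun result p =>
        if p.1 = "+" then result + p.2
        else if p.1 = "*" then result * p.2
        else result) x)

-- ===== PORT B =====
def generate_and_evaluate_alt (numbers : List Int) : List Int :=
  match numbers with
  | [] => []
  | x :: rest =>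
    rest.foldl (fun acc num => acc.flatMap (fun r => [r + num, r * num])) [x]

-- ===== PRECONDITION & SPEC =====
def Spec_generate_and_evaluate (numbers : List Int) (out : List Int) : Prop := out = generate_and_evaluate_alt numbers
instance (numbers : List Int) (out : List Int) : Decidable (Spec_generate_and_evaluate numbers out) := by unfold Spec_generate_and_evaluate; infer_instance

-- ===== CLAIM (what is proved, stated in full; the proofs are below) =====
def Claim_equal_generate_and_evaluate : Prop := ∀ (numbers : List Int), Dom_generate_and_evaluate numbers → Spec_generate_and_evaluate numbers (generate_and_evaluate numbers)

-- ===== LEMMAS AND PROOFS =====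

-- B's step function
def bstep (acc : List Int) (num : Int) : List Int := acc.flatMap (fun r => [r + num, r * num])

-- B's fold distributes over an append of the accumulator list
lemma foldl_bstep_append (rest : List Int) :
    ∀ (l1 l2 : List Int), rest.foldl bstep (l1 ++ l2) = rest.foldl bstep l1 ++ rest.foldl bstep l2 := by
  induction rest with
  | nil => intro l1 l2; rfl
  | cons num rest' ih =>
    intro l1 l2
    simp only [List.foldl_cons]
    rw [show bstep (l1 ++ l2) num = bstep l1 num ++ bstep l2 num from List.flatMap_append .., ih]

-- main lemma: A's map over all op tuples equals B's fold, for any start value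
lemma main_lemma (rest : List Int) : ∀ (x : Int),
    (prodRep ["+", "*"] rest.length).map (fun op_comb =>
      (List.zip op_comb rest).foldl (fun result p =>
        if p.1 = "+" then result + p.2
        else if p.1 = "*" then result * p.2
        else result) x)
    = rest.foldl bstep [x] := by
  induction rest with
  | nil => intro x; rfl
  | cons num rest' ih =>
    intro x
    show (["+", "*"].flatMap (fun o => (prodRep ["+", "*"] rest'.length).map (fun c => o :: c))).map _ = _
    simp only [List.flatMap_cons, List.flatMap_nil, List.append_nil, List.map_append,
      List.map_map, Function.comp_def, List.zip_cons_cons, List.foldl_cons]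
    norm_num
    rw [if_neg (by decide : ¬(("*" : String) = "+"))]
    rw [ih (x + num), ih (x * num),
      show bstep [x] num = [x + num] ++ [x * num] from rfl, foldl_bstep_append]

-- ===== VERDICT (by name: the statement is the Claim_ definition above) =====
theorem generate_and_evaluate_spec : Claim_equal_generate_and_evaluate := by
  intro numbers _
  unfold Spec_generate_and_evaluate generate_and_evaluate generate_and_evaluate_alt
  match numbers with
  | [] => rfl
  | [x] => rfl
  | x :: y :: rest =>
    show _ = (y :: rest).foldl (fun acc num => acc.flatMap (fun r => [r + num, r * num])) [x]
    rw [show (fun acc num => acc.flatMap (fun r => [r + num, r * num])) = bstep from rfl]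
    exact main_lemma (y :: rest) x
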